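-- pv_equiv track=rewrite | github.com/faraz18001/DS2-Project-Main | knapsack.py | _interleave_by_year
-- ===== SOURCE A (Python) =====
-- from collections import defaultdict
--
-- def _interleave_by_year(candidates):
--     """
--     Round-robin through years so consecutive selections come from
--     different papers. Keeps the resulting worksheet diverse.
--
--     Algorithm:
--       1. Group candidates by year.
--       2. Repeatedly pop the front of each year's bucket in rotation,
--          newest year first.
--
--     Args:
--         candidates: list of question record dicts
--
--     Returns:
--         list of the same records in interleaved order
--     """
--     groups = defaultdict(list)
--     for q in candidates:
--         groups[q.get("year", 0)].append(q)
--
--     # Newest year first — small bias toward recent papers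
--     years = sorted(groups.keys(), reverse=True)
--
--     result = []
--     while any(groups[y] for y in years):
--         for y in years:
--             if groups[y]:
--                 result.append(groups[y].pop(0))
--     return result
-- ===== SOURCE B (Python) =====
-- def _interleave_by_year(candidates):
--     # Group by year (insertion order), newest year first, then take the
--     # i-th element of every bucket for i = 0,1,... (non-destructive:
--     # no pop(0), no repeated emptiness re-scans).
--     groups = {}
--     for q in candidates:
--         groups.setdefault(q.get("year", 0), []).append(q)
--
--     buckets = [groups[y] for y in sorted(groups, reverse=True)]
--
--     longest = 0
--     for b in buckets:
--         longest = max(longest, len(b))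
--
--     return [b[i] for i in range(longest) for b in buckets if i < len(b)]
-- ===== Notes on version B (the rewrite author's own statement) =====
-- stated objective: alternative
-- what changed: Replaces the destructive while/pop(0) round-robin with per-round emptiness re-scans by a single non-destructive index-based comprehension that reads the i-th element of each year bucket directly.
import Mathlib
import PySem

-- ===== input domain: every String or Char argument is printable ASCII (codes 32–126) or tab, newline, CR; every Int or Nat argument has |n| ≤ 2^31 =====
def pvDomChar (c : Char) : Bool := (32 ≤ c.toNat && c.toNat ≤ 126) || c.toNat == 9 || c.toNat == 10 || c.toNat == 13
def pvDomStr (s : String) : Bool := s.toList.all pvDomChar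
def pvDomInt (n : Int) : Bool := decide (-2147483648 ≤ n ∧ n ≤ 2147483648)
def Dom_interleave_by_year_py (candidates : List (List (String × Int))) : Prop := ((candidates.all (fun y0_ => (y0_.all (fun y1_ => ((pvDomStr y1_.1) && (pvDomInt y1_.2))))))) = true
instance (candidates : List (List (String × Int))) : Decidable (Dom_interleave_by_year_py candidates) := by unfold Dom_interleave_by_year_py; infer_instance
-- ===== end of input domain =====

-- B replaces A's destructive while/pop(0) round-robin with one index-based pass
-- over the year buckets; equivalence of the RETURN values is proved (A mutates
-- its internal buckets only, not the argument).

-- ===== PORT A =====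

-- q.get("year", 0): the record list is a Python dict built from its pairs
def pvYear (q : List (String × Int)) : Int := (PySem.Dict.ofList q).getD "year" 0

-- groups = defaultdict(list); for q: groups[year].append(q)
def pvGroups (candidates : List (List (String × Int))) :
    PySem.Dict Int (List (List (String × Int))) :=
  candidates.foldl (fun d q => d.modify (pvYear q) [] (· ++ [q])) PySem.Dict.empty

-- termination measure fact for the while loop: one round strictly shrinks the total size
theorem pvRoundShrinks {α : Type} (bs : List (List α)) (h : bs.any (fun b => !b.isEmpty)) :
    ((bs.map List.tail).map List.length).sum < (bs.map List.length).sum := by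
  induction bs with
  | nil => simp at h
  | cons b t ih =>
    simp only [List.any_cons, Bool.or_eq_true] at h
    rcases h with h | h
    · have hb : b ≠ [] := by cases b <;> simp_all
      have : (t.map (List.length ∘ List.tail)).sum ≤ (t.map List.length).sum := by
        apply List.sum_le_sum; intro x hx
        simp [List.length_tail]
      simp only [List.map_cons, List.sum_cons, List.map_map]
      have hb' : b.tail.length < b.length := by
        cases b with | nil => simp_all | cons _ _ => simp
      omega
    · have := ih h
      simp only [List.map_cons, List.sum_cons, List.map_map] at *
      have hb' : b.tail.length ≤ b.length := by simp [List.length_tail]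
      omega

-- while any(groups[y] for y in years): for y in years: if groups[y]: result.append(groups[y].pop(0))
-- one pass of the for-loop collects the front of every nonempty bucket and leaves the tails
def pvLoopA {α : Type} (bs : List (List α)) : List α :=
  if h : bs.any (fun b => !b.isEmpty) then
    bs.filterMap List.head? ++ pvLoopA (bs.map List.tail)
  else []
termination_by (bs.map List.length).sum
decreasing_by exact pvRoundShrinks bs h

def interleave_by_year_py (candidates : List (List (String × Int))) : List (List (String × Int)) :=
  let groups := pvGroups candidates
  -- years = sorted(groups.keys(), reverse=True)
  let years := PySem.List.sorted groups.keys (fun y => y) true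
  pvLoopA (years.map (fun y => groups.getD y []))

-- ===== PORT B =====

def interleave_by_year_py_alt (candidates : List (List (String × Int))) : List (List (String × Int)) :=
  -- groups = {}; for q: groups.setdefault(q.get("year",0), []).append(q)
  let groups := candidates.foldl
    (fun d q => d.modify ((PySem.Dict.ofList q).getD "year" 0) [] (· ++ [q])) PySem.Dict.empty
  -- buckets = [groups[y] for y in sorted(groups, reverse=True)]
  let buckets := (PySem.List.sorted groups.keys (fun y => y) true).map (fun y => groups.getD y [])
  -- longest = 0; for b in buckets: longest = max(longest, len(b))
  let longest := buckets.foldl (fun m b => max m b.length) 0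
  -- [b[i] for i in range(longest) for b in buckets if i < len(b)]
  (List.range longest).flatMap (fun i => buckets.filterMap (fun b => b[i]?))

-- ===== PRECONDITION & SPEC =====
def Spec_interleave_by_year_py (candidates : List (List (String × Int))) (out : List (List (String × Int))) : Prop := out = interleave_by_year_py_alt candidates
instance (candidates : List (List (String × Int))) (out : List (List (String × Int))) : Decidable (Spec_interleave_by_year_py candidates out) := by unfold Spec_interleave_by_year_py; infer_instance

-- ===== CLAIM (what is proved, stated in full; the proofs are below) =====
def Claim_equal_interleave_by_year_py : Prop := ∀ (candidates : List (List (String × Int))), Dom_interleave_by_year_py candidates → Spec_interleave_by_year_py candidates (interleave_by_year_py candidates)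

-- ===== LEMMAS AND PROOFS =====

theorem pvFoldlMaxInit {α : Type} (l : List (List α)) (a : Nat) :
    l.foldl (fun m b => max m b.length) a = max a (l.foldl (fun m b => max m b.length) 0) := by
  induction l generalizing a with
  | nil => simp
  | cons b t ih =>
    simp only [List.foldl_cons]
    rw [ih (max a b.length), ih (max 0 b.length)]
    omega

theorem pvFoldlMax_tail {α : Type} (bs : List (List α)) (a : Nat) (ha : 0 < a) :
    (bs.map List.tail).foldl (fun m b => max m b.length) (a - 1)
      = bs.foldl (fun m b => max m b.length) a - 1 := by
  induction bs generalizing a with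
  | nil => simp
  | cons b t ih =>
    simp only [List.map_cons, List.foldl_cons]
    have h1 : max (a - 1) b.tail.length = max a b.length - 1 := by
      simp [List.length_tail]; omega
    rw [h1, ih (max a b.length) (by omega)]

theorem pvAllNil_max_zero {α : Type} (bs : List (List α)) (hall : ∀ b ∈ bs, b = []) :
    bs.foldl (fun m b => max m b.length) 0 = 0 := by
  induction bs with
  | nil => rfl
  | cons b t ih =>
    have hb : b = [] := hall b (by simp)
    subst hb
    simpa using ih (fun x hx => hall x (by simp [hx]))

theorem pvMaxZero_allNil {α : Type} (bs : List (List α))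
    (h : bs.foldl (fun m b => max m b.length) 0 = 0) :
    bs.any (fun b => !b.isEmpty) = false := by
  simp only [List.any_eq_false]
  intro b hb
  have hle := (PySem.List.le_foldl_max (bs.map List.length) 0).2 b.length
    (List.mem_map_of_mem hb)
  rw [List.foldl_map, h] at hle
  cases b <;> simp_all

theorem pvMaxPos_someNonempty {α : Type} (bs : List (List α))
    (h : bs.foldl (fun m b => max m b.length) 0 ≠ 0) :
    bs.any (fun b => !b.isEmpty) = true := by
  by_contra hc
  simp only [Bool.not_eq_true, List.any_eq_false] at hc
  exact h (pvAllNil_max_zero bs (fun b hb => by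
    have := hc b hb; cases b <;> simp_all))

-- the core equivalence: A's round-robin loop = B's index pass, for any bucket list
theorem pvLoopA_eq_index {α : Type} (bs : List (List α)) :
    pvLoopA bs = (List.range (bs.foldl (fun m b => max m b.length) 0)).flatMap
      (fun i => bs.filterMap (fun b => b[i]?)) := by
  generalize hm : bs.foldl (fun m b => max m b.length) 0 = m
  induction m generalizing bs with
  | zero =>
    rw [pvLoopA]
    simp [pvMaxZero_allNil bs hm]
  | succ n ih =>
    rw [pvLoopA]
    have hany : bs.any (fun b => !b.isEmpty) = true :=
      pvMaxPos_someNonempty bs (by omega)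
    simp only [hany, dite_true]
    have htails : (bs.map List.tail).foldl (fun m b => max m b.length) 0 = n := by
      have h2 := pvFoldlMax_tail bs 1 (by omega)
      simp only [Nat.sub_self] at h2
      rw [h2, pvFoldlMaxInit bs 1, hm]
      omega
    rw [ih (bs.map List.tail) htails]
    rw [List.range_succ_eq_map]
    simp only [List.flatMap_cons, List.flatMap_map]
    congr 1
    · -- heads of the nonempty buckets  =  index 0 of each bucket
      apply List.filterMap_congr
      intro b _
      cases b <;> rfl
    · -- the remaining rounds read index i of each tail = index i+1 of each bucket
      apply List.flatMap_congr
      intro i _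
      rw [List.filterMap_map]
      apply List.filterMap_congr
      intro b _
      simp [List.getElem?_tail]

-- ===== VERDICT (by name: the statement is the Claim_ definition above) =====
theorem interleave_by_year_py_spec : Claim_equal_interleave_by_year_py := by
  intro candidates _
  unfold Spec_interleave_by_year_py interleave_by_year_py interleave_by_year_py_alt pvGroups pvYear
  exact pvLoopA_eq_index _
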